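-- pv_equiv track=rewrite | github.com/dsweet99/dryer | tests/benchmark_data/module_017.py | compute_17_12
-- ===== SOURCE A (Python) =====
-- def compute_17_12(a, b, c):
--     x = a * 326 + b * 307
--     y = c * 250 - a * 255
--     for i in range(14):
--         x = x + i * 64
--         y = y - i * 42
--         if x > 6820:
--             x = x % 1910
--     return x + y + 205
-- ===== SOURCE B (Python) =====
-- def _pre(j):
--     # total amount added to x by iterations 0..j: 64 * (0 + 1 + ... + j)
--     return 32 * j * (j + 1)
--
--
-- def _run(x, k, applied):
--     # Event-jump evaluation of the x loop: between branch firings x only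
--     # accumulates an arithmetic series, so jump straight (via the prefix
--     # sums _pre) to the next iteration j whose post-addition value exceeds
--     # 6820, apply the single mod there, and continue after it.
--     j = next((j for j in range(k, 14) if x + _pre(j) - applied > 6820), None)
--     if j is None:
--         return x + _pre(13) - applied
--     return _run((x + _pre(j) - applied) % 1910, j + 1, _pre(j))
--
--
-- def compute_17_12(a, b, c):
--     x = _run(a * 326 + b * 307, 0, 0)
--     y = c * 250 - a * 255 - 3822   # y's loop in closed form: 42*sum(range(14)) = 3822
--     return x + y + 205
-- ===== Notes on version B (the rewrite author's own statement) =====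
-- stated objective: alternative
-- what changed: The per-iteration loop is replaced by an event-jump algorithm: y is a closed form, and x jumps directly between the (at most a few) iterations where the mod branch fires, using the arithmetic-series prefix sums 32*j*(j+1) instead of stepping through all 14 iterations.
import Mathlib
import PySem

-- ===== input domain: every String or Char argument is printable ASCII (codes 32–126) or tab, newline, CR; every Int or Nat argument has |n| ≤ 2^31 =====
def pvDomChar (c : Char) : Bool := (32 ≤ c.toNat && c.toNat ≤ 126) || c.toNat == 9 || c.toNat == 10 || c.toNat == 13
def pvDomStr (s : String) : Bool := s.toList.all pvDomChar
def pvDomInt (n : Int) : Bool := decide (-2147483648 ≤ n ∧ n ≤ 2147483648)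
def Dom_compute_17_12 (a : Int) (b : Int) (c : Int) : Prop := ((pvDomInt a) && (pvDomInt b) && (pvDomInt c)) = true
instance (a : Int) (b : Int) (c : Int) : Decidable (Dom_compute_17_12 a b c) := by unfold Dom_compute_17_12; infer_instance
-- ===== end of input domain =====

-- B replaces the 14-step loop by an event-jump algorithm (closed-form y, jumps between mod firings via prefix sums); objective: alternative, same cost.

-- ===== PORT A =====
def stepA (s : Int × Int) (i : Int) : Int × Int :=
  let x := s.1 + i * 64
  let y := s.2 - i * 42
  (if x > 6820 then PySem.Int.mod x 1910 else x, y)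

def compute_17_12 (a : Int) (b : Int) (c : Int) : Int :=
  let x := a * 326 + b * 307
  let y := c * 250 - a * 255
  let s := (PySem.List.pyRange 0 14 1).foldl stepA (x, y)
  s.1 + s.2 + 205

-- ===== PORT B =====
-- _pre(j) = total amount added to x by iterations 0..j
def preB (j : Int) : Int := 32 * j * (j + 1)

-- _run from Source B; the Nat fuel only makes the recursion structural (Python's
-- recursion always terminates since k strictly increases towards 14).
def runB : Nat → Int → Int → Int → Int
  | 0, x, _, _ => x
  | f + 1, x, k, applied =>
    match (PySem.List.pyRange k 14 1).find? (fun j => decide (x + preB j - applied > 6820)) with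
    | none => x + preB 13 - applied
    | some j => runB f (PySem.Int.mod (x + preB j - applied) 1910) (j + 1) (preB j)

def compute_17_12_alt (a : Int) (b : Int) (c : Int) : Int :=
  let x := runB 15 (a * 326 + b * 307) 0 0
  let y := c * 250 - a * 255 - 3822
  x + y + 205

-- ===== PRECONDITION & SPEC =====
def Spec_compute_17_12 (a : Int) (b : Int) (c : Int) (out : Int) : Prop := out = compute_17_12_alt a b c
instance (a : Int) (b : Int) (c : Int) (out : Int) : Decidable (Spec_compute_17_12 a b c out) := by unfold Spec_compute_17_12; infer_instance

-- ===== CLAIM (what is proved, stated in full; the proofs are below) =====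
def Claim_equal_compute_17_12 : Prop := ∀ (a : Int) (b : Int) (c : Int), Dom_compute_17_12 a b c → Spec_compute_17_12 a b c (compute_17_12 a b c)

-- ===== LEMMAS AND PROOFS =====

-- A's x-update alone
def stepX (x : Int) (i : Int) : Int :=
  let x := x + i * 64
  if x > 6820 then PySem.Int.mod x 1910 else x

theorem foldA_eq (l : List Int) (x y : Int) :
    l.foldl stepA (x, y) = (l.foldl stepX x, y - 42 * l.sum) := by
  induction l generalizing x y with
  | nil => simp
  | cons i t ih =>
      simp only [List.foldl_cons, List.sum_cons, stepA, stepX]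
      rw [ih]
      refine Prod.ext ?_ ?_
      · rfl
      · ring

theorem runB_none (f : ℕ) (x k applied : Int)
    (h : (PySem.List.pyRange k 14 1).find? (fun j => decide (x + preB j - applied > 6820)) = none) :
    runB (f + 1) x k applied = x + preB 13 - applied := by
  simp only [runB, h]

theorem runB_some (f : ℕ) (x k applied j : Int)
    (h : (PySem.List.pyRange k 14 1).find? (fun j => decide (x + preB j - applied > 6820)) = some j) :
    runB (f + 1) x k applied
      = runB f (PySem.Int.mod (x + preB j - applied) 1910) (j + 1) (preB j) := by
  simp only [runB, h]

-- the recursion depth of runB is bounded by 14 - k, so any sufficient fuel gives the same value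
theorem runB_fuel (n : ℕ) : ∀ (f g : ℕ) (x k applied : Int),
    (14 - k).toNat ≤ n → (14 - k).toNat < f → (14 - k).toNat < g →
    runB f x k applied = runB g x k applied := by
  induction n with
  | zero =>
      intro f g x k applied hn hf hg
      match f, g with
      | f' + 1, g' + 1 =>
        have hk : (14 : Int) ≤ k := by omega
        have hnil := PySem.List.pyRange_one_eq_nil hk
        rw [runB_none f' x k applied (by rw [hnil]; rfl),
            runB_none g' x k applied (by rw [hnil]; rfl)]
  | succ m ih =>
      intro f g x k applied hn hf hg
      match f, g with
      | f' + 1, g' + 1 =>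
        cases hfind : (PySem.List.pyRange k 14 1).find?
            (fun j => decide (x + preB j - applied > 6820)) with
        | none => rw [runB_none f' x k applied hfind, runB_none g' x k applied hfind]
        | some j =>
            have hmem := List.mem_of_find?_eq_some hfind
            rw [PySem.List.mem_pyRange_one] at hmem
            rw [runB_some f' x k applied j hfind, runB_some g' x k applied j hfind]
            exact ih f' g' _ (j + 1) _ (by omega) (by omega) (by omega)

theorem runB_eq_fold (n : ℕ) : ∀ (x k applied : Int),
    0 ≤ k → k ≤ 14 → (14 - k).toNat ≤ n →
    runB (n + 1) x k applied
      = (PySem.List.pyRange k 14 1).foldl stepX (x + preB (k - 1) - applied) := by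
  induction n with
  | zero =>
      intro x k applied h0 h14 hn
      have hk : k = 14 := by omega
      subst hk
      have hnil := PySem.List.pyRange_one_eq_nil (by norm_num : (14:Int) ≤ 14)
      rw [runB_none 0 x 14 applied (by rw [hnil]; rfl), hnil]
      rfl
  | succ m ih =>
      intro x k applied h0 h14 hn
      by_cases hk : k = 14
      · subst hk
        have hnil := PySem.List.pyRange_one_eq_nil (by norm_num : (14:Int) ≤ 14)
        rw [runB_none (m + 1) x 14 applied (by rw [hnil]; rfl), hnil]
        rfl
      · have hklt : k < 14 := by omega
        rw [PySem.List.pyRange_one_cons hklt]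
        by_cases hp : x + preB k - applied > 6820
        · -- the branch fires at step k itself
          have hfind : (PySem.List.pyRange k 14 1).find?
              (fun j => decide (x + preB j - applied > 6820)) = some k := by
            rw [PySem.List.pyRange_one_cons hklt, List.find?_cons_of_pos]
            simpa using hp
          have h2 := ih (PySem.Int.mod (x + preB k - applied) 1910) (k + 1) (preB k)
            (by omega) (by omega) (by omega)
          rw [show (k + 1 - 1 : Int) = k from by ring] at h2
          rw [runB_some (m + 1) x k applied k hfind, h2]
          simp only [List.foldl_cons, stepX]
          have harg : x + preB (k - 1) - applied + k * 64 = x + preB k - applied := by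
            simp only [preB]; ring
          rw [harg, if_pos hp]
          congr 1
          ring
        · -- step k does not fire: peel it off
          cases hfind2 : (PySem.List.pyRange (k + 1) 14 1).find?
              (fun j => decide (x + preB j - applied > 6820)) with
          | none =>
              have hfind : (PySem.List.pyRange k 14 1).find?
                  (fun j => decide (x + preB j - applied > 6820)) = none := by
                rw [PySem.List.pyRange_one_cons hklt, List.find?_cons_of_neg]
                · exact hfind2
                · simpa using hp
              have h2 := ih x (k + 1) applied (by omega) (by omega) (by omega)
              rw [show (k + 1 - 1 : Int) = k from by ring] at h2
              rw [runB_none (m + 1) x k applied hfind]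
              simp only [List.foldl_cons, stepX]
              have harg : x + preB (k - 1) - applied + k * 64 = x + preB k - applied := by
                simp only [preB]; ring
              rw [harg, if_neg hp, ← h2, runB_none m x (k + 1) applied hfind2]
          | some j =>
              have hmem := List.mem_of_find?_eq_some hfind2
              rw [PySem.List.mem_pyRange_one] at hmem
              have hfind : (PySem.List.pyRange k 14 1).find?
                  (fun j => decide (x + preB j - applied > 6820)) = some j := by
                rw [PySem.List.pyRange_one_cons hklt, List.find?_cons_of_neg]
                · exact hfind2
                · simpa using hp
              have h2 := ih x (k + 1) applied (by omega) (by omega) (by omega)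
              rw [show (k + 1 - 1 : Int) = k from by ring] at h2
              rw [runB_some (m + 1) x k applied j hfind]
              simp only [List.foldl_cons, stepX]
              have harg : x + preB (k - 1) - applied + k * 64 = x + preB k - applied := by
                simp only [preB]; ring
              rw [harg, if_neg hp, ← h2, runB_some m x (k + 1) applied j hfind2]
              exact runB_fuel (14 - (j + 1)).toNat (m + 1) m
                (PySem.Int.mod (x + preB j - applied) 1910) (j + 1) (preB j)
                (le_refl _) (by omega) (by omega)

-- ===== VERDICT (by name: the statement is the Claim_ definition above) =====
theorem compute_17_12_spec : Claim_equal_compute_17_12 := by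
  intro a b c _
  unfold Spec_compute_17_12 compute_17_12 compute_17_12_alt
  simp only [foldA_eq]
  rw [show (15 : ℕ) = 14 + 1 from rfl,
      runB_eq_fold 14 (a * 326 + b * 307) 0 0 (by norm_num) (by norm_num) (by norm_num)]
  rw [show a * 326 + b * 307 + preB (0 - 1) - 0 = a * 326 + b * 307 from by
        simp only [preB]; ring]
  have hsum : (PySem.List.pyRange 0 14 1).sum = 91 := by decide
  simp only [hsum]
  ring
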